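-- pv_equiv track=rewrite | github.com/Tubbz-alt/lc2-hdf5-110 | python/ana_daq_util.py | divide_evenly
-- ===== SOURCE A (Python) =====
-- import math
--
-- def check_counts_offsets(counts, offsets, total):
--     '''Makes sure that the counts and offsets partition total.
--
--     Throws an exception if there is a problem
--
--     Examples:
--       >>> check_counts_offsets(counts=[2,2,2], offsets=[0,2,4], total=6)
--       # this is correct.
--       >>> check_counts_offsets(counts=[2,2,2], offsets=[0,2,4], total=7)
--       # incorrect, throws assert
--       >>> check_counts_offsets(counts=[2,2,2], offsets=[2,4,6], total=6)
--       # incorrect, ect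
--     '''
--     assert sum(counts)==total, 'counts=%r offsets=%r do not partition total=%d' % (counts, offsets, total)
--     assert offsets[0]==0, 'counts=%r offsets=%r do not partition total=%d' % (counts, offsets, total)
--     assert len(counts)==len(offsets), 'counts=%r offsets=%r do not partition total=%d' % (counts, offsets, total)
--     for i in range(1,len(counts)):
--         assert offsets[i]==offsets[i-1]+counts[i-1], 'counts=%r offsets=%r do not partition total=%d' % (counts, offsets, total)
--     assert offsets[-1]+counts[-1]==total, 'counts=%r offsets=%r do not partition total=%d' % (counts, offsets, total)
--
-- def divide_evenly(total, splits):
--     '''partition the amount of data as evenly as possible.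
--
--     Examples:
--       >>> divide_evenly(11,3)
--       returns offsets=[0,4,8]
--               counts=[4,4,3]
--     '''
--     assert splits > 0, "divide_evenly - splits is <= 0"
--     k = int(math.floor(total / splits))
--     r = total % splits
--     offsets=[]
--     counts=[]
--     nextOffset = 0
--     for w in range(splits):
--         offsets.append(nextOffset)
--         count = k
--         if r > 0:
--             count += 1
--             r -= 1
--         counts.append(count)
--         nextOffset += count
--     check_counts_offsets(counts, offsets, total)
--     return offsets, counts
-- ===== SOURCE B (Python) =====
-- import math
--
-- def divide_evenly(total, splits):
--     '''partition the amount of data as evenly as possible (closed-form version).'''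
--     assert splits > 0, "divide_evenly - splits is <= 0"
--     k = int(math.floor(total / splits))
--     r = total % splits
--     offsets = [w * k + min(w, r) for w in range(splits)]
--     counts = [k + (1 if w < r else 0) for w in range(splits)]
--     return offsets, counts
-- ===== Notes on version B (the rewrite author's own statement) =====
-- stated objective: simpler
-- what changed: Replaces the running-accumulator loop (mutating nextOffset and r) by closed-form per-index formulas: offsets[w] = w*k + min(w, r) and counts[w] = k + (1 if w < r else 0), and drops the always-passing self-check.
import Mathlib
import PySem

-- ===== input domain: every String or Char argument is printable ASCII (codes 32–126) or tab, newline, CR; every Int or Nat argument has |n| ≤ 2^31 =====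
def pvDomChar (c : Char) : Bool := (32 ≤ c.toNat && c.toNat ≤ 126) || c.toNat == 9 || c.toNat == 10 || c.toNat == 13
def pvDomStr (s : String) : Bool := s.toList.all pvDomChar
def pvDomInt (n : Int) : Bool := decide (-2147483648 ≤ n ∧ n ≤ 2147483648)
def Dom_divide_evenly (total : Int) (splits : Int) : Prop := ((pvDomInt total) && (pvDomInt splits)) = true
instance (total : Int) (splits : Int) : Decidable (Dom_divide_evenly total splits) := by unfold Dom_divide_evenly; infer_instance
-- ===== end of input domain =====

-- B replaces A's running-accumulator loop by closed-form per-index formulas (simpler decomposition; same cost).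


-- ===== PORT A =====
-- Notes on exactness: `k = int(math.floor(total / splits))` equals floor division for |total|,|splits| ≤ 2^31
-- (the float quotient cannot round across an integer there), ported as PySem.Int.floordiv.
-- `assert splits > 0` raises for splits ≤ 0 (excluded by Pre_); the guard only keeps the port total.
-- `check_counts_offsets` is assertion-only (no value effect); its asserts always pass when splits > 0.
def divide_evenly (total : Int) (splits : Int) : List Int × List Int :=
  if splits ≤ 0 then ([], []) else
  let k := PySem.Int.floordiv total splits
  let st := (PySem.List.pyRange 0 splits 1).foldl
      (fun (s : List Int × List Int × Int × Int) _w =>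
        let offsets := s.1
        let counts := s.2.1
        let r := s.2.2.1
        let nextOffset := s.2.2.2
        let count := if r > 0 then k + 1 else k
        let r' := if r > 0 then r - 1 else r
        (offsets ++ [nextOffset], counts ++ [count], r', nextOffset + count))
      ([], [], PySem.Int.mod total splits, 0)
  (st.1, st.2.1)

-- ===== PORT B =====
def divide_evenly_alt (total : Int) (splits : Int) : List Int × List Int :=
  if splits ≤ 0 then ([], []) else
  let k := PySem.Int.floordiv total splits
  let r := PySem.Int.mod total splits
  ((PySem.List.pyRange 0 splits 1).map (fun w => w * k + min w r),
   (PySem.List.pyRange 0 splits 1).map (fun w => k + if w < r then 1 else 0))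

-- ===== PRECONDITION & SPEC =====
-- Pre_ excludes splits ≤ 0, on which A's first assert raises AssertionError.
def Pre_divide_evenly (total : Int) (splits : Int) : Prop := 0 < splits
instance (total : Int) (splits : Int) : Decidable (Pre_divide_evenly total splits) := by unfold Pre_divide_evenly; infer_instance
def pvWitness_divide_evenly : Int × Int := (11, 3)

def Spec_divide_evenly (total : Int) (splits : Int) (out : List Int × List Int) : Prop := out = divide_evenly_alt total splits
instance (total : Int) (splits : Int) (out : List Int × List Int) : Decidable (Spec_divide_evenly total splits out) := by unfold Spec_divide_evenly; infer_instance

-- ===== CLAIM (what is proved, stated in full; the proofs are below) =====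
def Claim_equal_divide_evenly : Prop := ∀ (total : Int) (splits : Int), Dom_divide_evenly total splits → Pre_divide_evenly total splits → Spec_divide_evenly total splits (divide_evenly total splits)

-- ===== LEMMAS AND PROOFS =====

-- Loop invariant: after processing range(n), the accumulator state is the closed form.
lemma divide_evenly_loop_inv (k r0 : Int) (hr : 0 ≤ r0) (n : Nat) :
    (PySem.List.pyRange 0 (n : Int) 1).foldl
      (fun (s : List Int × List Int × Int × Int) _w =>
        let offsets := s.1
        let counts := s.2.1
        let r := s.2.2.1
        let nextOffset := s.2.2.2
        let count := if r > 0 then k + 1 else k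
        let r' := if r > 0 then r - 1 else r
        (offsets ++ [nextOffset], counts ++ [count], r', nextOffset + count))
      ([], [], r0, 0)
    = ((PySem.List.pyRange 0 (n : Int) 1).map (fun w => w * k + min w r0),
       (PySem.List.pyRange 0 (n : Int) 1).map (fun w => k + if w < r0 then 1 else 0),
       r0 - min (n : Int) r0, (n : Int) * k + min (n : Int) r0) := by
  induction n with
  | zero =>
      simp [PySem.List.pyRange_one_eq_nil]
      omega
  | succ n ih =>
      have h1 : (0 : Int) ≤ (n : Int) := by exact_mod_cast Nat.zero_le n
      rw [show ((Nat.succ n : Nat) : Int) = (n : Int) + 1 by push_cast; ring]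
      rw [PySem.List.pyRange_one_succ_right h1, List.foldl_append, ih, List.map_append, List.map_append]
      simp only [List.foldl_cons, List.foldl_nil, List.map_cons, List.map_nil]
      have hcase : ((r0 - min (n : Int) r0 > 0) ↔ ((n : Int) < r0)) := by omega
      by_cases h : (n : Int) < r0
      · simp only [if_pos (hcase.mpr h), if_pos h]
        refine Prod.ext ?_ (Prod.ext ?_ (Prod.ext ?_ ?_)) <;> simp [add_mul] <;> omega
      · simp only [if_neg (fun hh => h (hcase.mp hh)), if_neg h]
        refine Prod.ext ?_ (Prod.ext ?_ (Prod.ext ?_ ?_)) <;> simp [add_mul] <;> omega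

-- ===== VERDICT (by name: the statement is the Claim_ definition above) =====
theorem divide_evenly_spec : Claim_equal_divide_evenly := by
  intro total splits _ hpre
  have hs : ¬ splits ≤ 0 := by exact not_le.mpr hpre
  unfold Spec_divide_evenly divide_evenly divide_evenly_alt
  rw [if_neg hs, if_neg hs]
  have hr : 0 ≤ PySem.Int.mod total splits := by
    rw [PySem.Int.mod_eq_emod_of_pos hpre]
    exact Int.emod_nonneg total (by omega)
  have hcast : (((splits.toNat : Nat) : Int)) = splits := Int.toNat_of_nonneg (le_of_lt hpre)
  have := divide_evenly_loop_inv (PySem.Int.floordiv total splits) (PySem.Int.mod total splits) hr splits.toNat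
  rw [hcast] at this
  simp only [this]
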